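-- pv_equiv track=rewrite | github.com/boredmanager888/mycommonrepo | pythonwb_list/E113_test.py | word_list_fmt
-- ===== SOURCE A (Python) =====
-- def word_list_fmt(str_list):
--   str_list_fmt = ""
--   ctr = 0
--   while ctr <= len(str_list) - 1:
--     if len(str_list) == 1:
--       str_list_fmt = str_list[ctr]
--       break
--     elif len(str_list) == 2:
--       str_list_fmt = str_list[0] + " and " + str_list[1]
--       break
--     else:
--       if ctr == len(str_list) - 2:
--         str_list_fmt += str_list[ctr] + " and " + str_list[ctr + 1]
--         break
--       else:
--         str_list_fmt += str_list[ctr] + ", "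
--     ctr += 1
--   return str_list_fmt
-- ===== SOURCE B (Python) =====
-- def word_list_fmt(str_list):
--     if not str_list:
--         return ""
--     if len(str_list) == 1:
--         return str_list[0]
--     return ", ".join(str_list[:-1]) + " and " + str_list[-1]
-- ===== Notes on version B (the rewrite author's own statement) =====
-- stated objective: simpler
-- what changed: Replaces A's counter-driven while loop (quadratic repeated string concatenation with per-iteration second-to-last/length branches) by two base cases plus a single ', '.join of the [:-1] prefix concatenated with ' and ' and the last element.
import Mathlib
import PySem

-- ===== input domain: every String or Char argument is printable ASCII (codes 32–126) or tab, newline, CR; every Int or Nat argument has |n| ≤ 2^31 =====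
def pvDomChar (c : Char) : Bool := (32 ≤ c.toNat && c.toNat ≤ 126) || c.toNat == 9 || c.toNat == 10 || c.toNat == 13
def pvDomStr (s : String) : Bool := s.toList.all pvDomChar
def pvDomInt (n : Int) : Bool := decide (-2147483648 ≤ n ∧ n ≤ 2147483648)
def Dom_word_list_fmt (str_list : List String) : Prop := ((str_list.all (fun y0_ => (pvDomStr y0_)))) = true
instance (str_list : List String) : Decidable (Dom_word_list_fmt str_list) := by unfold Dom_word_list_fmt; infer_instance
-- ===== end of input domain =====

-- B replaces A's counter-driven while loop (per-iteration length/second-to-last branches)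
-- by two base cases plus a single join of the dropLast prefix and one " and "-append (objective: simpler).

-- ===== PORT A =====
-- literal port of A's while loop: state (str_list_fmt, ctr); loop condition 'ctr <= len(str_list) - 1'
def wordListFmtLoopA (l : List String) (fmt : String) (ctr : Nat) : String :=
  if h : ctr < l.length then
    if l.length = 1 then (PySem.List.pyGet? l (ctr : Int)).getD ""
    else if l.length = 2 then
      ((PySem.List.pyGet? l 0).getD "") ++ " and " ++ ((PySem.List.pyGet? l 1).getD "")
    else if ctr = l.length - 2 then
      fmt ++ ((PySem.List.pyGet? l (ctr : Int)).getD "") ++ " and "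
          ++ ((PySem.List.pyGet? l ((ctr : Int) + 1)).getD "")
    else wordListFmtLoopA l (fmt ++ ((PySem.List.pyGet? l (ctr : Int)).getD "") ++ ", ") (ctr + 1)
  else fmt
termination_by l.length - ctr

def word_list_fmt (str_list : List String) : String :=
  wordListFmtLoopA str_list "" 0

-- ===== PORT B =====
def word_list_fmt_alt (str_list : List String) : String :=
  match str_list with
  | [] => ""
  | [x] => x
  | _ =>
    PySem.Str.join ", " (PySem.List.slice str_list none (some (-1)))
      ++ " and " ++ ((PySem.List.pyGet? str_list (-1)).getD "")

-- ===== PRECONDITION & SPEC =====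
def Spec_word_list_fmt (str_list : List String) (out : String) : Prop := out = word_list_fmt_alt str_list
instance (str_list : List String) (out : String) : Decidable (Spec_word_list_fmt str_list out) := by unfold Spec_word_list_fmt; infer_instance

-- ===== CLAIM (what is proved, stated in full; the proofs are below) =====
def Claim_equal_word_list_fmt : Prop := ∀ (str_list : List String), Dom_word_list_fmt str_list → Spec_word_list_fmt str_list (word_list_fmt str_list)

-- ===== LEMMAS AND PROOFS =====

-- canonical "a, b, …, y and z" for lists of length ≥ 2
def gFmt : List String → String
  | [x, y] => x ++ " and " ++ y
  | x :: rest@(_ :: _ :: _) => x ++ ", " ++ gFmt rest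
  | _ => ""

theorem gFmt_cons_long (x : String) (rest : List String) (h : 2 ≤ rest.length) :
    gFmt (x :: rest) = x ++ ", " ++ gFmt rest := by
  match rest with
  | y :: z :: t => simp [gFmt]

theorem join_comma_single (x : String) : PySem.Str.join ", " [x] = x := by
  apply String.ext
  simp [PySem.Str.join, PySem.Chars.join, List.intercalate]

theorem join_comma_cons (x y : String) (l : List String) :
    PySem.Str.join ", " (x :: y :: l) = x ++ ", " ++ PySem.Str.join ", " (y :: l) := by
  apply String.ext
  simp [PySem.Str.join, PySem.Chars.join, List.intercalate]

theorem alt_eq_gFmt : ∀ (l : List String), 2 ≤ l.length → word_list_fmt_alt l = gFmt l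
  | [x, y], _ => by
    simp [word_list_fmt_alt, gFmt, PySem.List.slice_to_neg_one, PySem.List.pyGet?_neg_one,
      join_comma_single]
  | x :: y :: z :: rest, _ => by
    have ih := alt_eq_gFmt (y :: z :: rest) (by simp)
    have hd : (x :: y :: z :: rest).dropLast = x :: (y :: z :: rest).dropLast := by
      simp [List.dropLast]
    have hdl : ∃ a b t, (y :: z :: rest).dropLast = a :: b :: t ∨ (y :: z :: rest).dropLast = [a] := by
      cases rest with
      | nil => exact ⟨y, y, [], Or.inr rfl⟩
      | cons w t => exact ⟨y, z, (w :: t).dropLast, Or.inl rfl⟩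
    simp only [word_list_fmt_alt, PySem.List.slice_to_neg_one, PySem.List.pyGet?_neg_one] at ih ⊢
    rw [hd]
    obtain ⟨a, b, t, hcase⟩ := hdl
    rcases hcase with hab | ha
    · rw [hab, join_comma_cons, ← hab]
      rw [gFmt_cons_long x (y :: z :: rest) (by simp)]
      rw [← ih]
      simp [String.append_assoc, List.getLast?]
    · rw [ha, join_comma_cons, join_comma_single, ← join_comma_single a, ← ha]
      rw [gFmt_cons_long x (y :: z :: rest) (by simp)]
      rw [← ih]
      simp [String.append_assoc]

theorem loopA_eq_gFmt (l : List String) (fmt : String) (ctr : Nat)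
    (h3 : 3 ≤ l.length) (hc : ctr < l.length - 1) :
    wordListFmtLoopA l fmt ctr = fmt ++ gFmt (l.drop ctr) := by
  have hlt : ctr < l.length := by omega
  rw [wordListFmtLoopA, dif_pos hlt, if_neg (by omega : ¬ l.length = 1),
    if_neg (by omega : ¬ l.length = 2)]
  have hget : PySem.List.pyGet? l (ctr : Int) = some l[ctr] := by
    simp [PySem.List.pyGet?_natCast, List.getElem?_eq_getElem hlt]
  by_cases he : ctr = l.length - 2
  · rw [if_pos he]
    have hlt1 : ctr + 1 < l.length := by omega
    have hget1 : PySem.List.pyGet? l ((ctr : Int) + 1) = some l[ctr + 1] := by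
      rw [show ((ctr : Int) + 1) = ((ctr + 1 : Nat) : Int) by push_cast; ring,
        PySem.List.pyGet?_natCast]
      exact List.getElem?_eq_getElem hlt1
    have hd : l.drop ctr = [l[ctr], l[ctr + 1]] := by
      rw [List.drop_eq_getElem_cons hlt, List.drop_eq_getElem_cons hlt1,
        List.drop_eq_nil_of_le (by omega : l.length ≤ ctr + 1 + 1)]
    rw [hd, hget, hget1]
    simp [gFmt, String.append_assoc]
  · rw [if_neg he]
    have ih := loopA_eq_gFmt l (fmt ++ ((PySem.List.pyGet? l (ctr : Int)).getD "") ++ ", ")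
      (ctr + 1) h3 (by omega)
    rw [ih]
    have hd : l.drop ctr = l[ctr] :: l.drop (ctr + 1) := List.drop_eq_getElem_cons hlt
    rw [hd, gFmt_cons_long l[ctr] (l.drop (ctr + 1)) (by simp; omega), hget]
    simp [String.append_assoc]
termination_by l.length - ctr

-- ===== VERDICT (by name: the statement is the Claim_ definition above) =====
theorem word_list_fmt_spec : Claim_equal_word_list_fmt := by
  intro l _
  unfold Spec_word_list_fmt word_list_fmt
  match l with
  | [] => simp [wordListFmtLoopA, word_list_fmt_alt]
  | [x] =>
    simp [wordListFmtLoopA, word_list_fmt_alt, PySem.List.pyGet?, PySem.List.pyIdx?]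
  | [x, y] =>
    rw [alt_eq_gFmt [x, y] (by simp)]
    simp [wordListFmtLoopA, gFmt, PySem.List.pyGet?, PySem.List.pyIdx?]
  | x :: y :: z :: rest =>
    rw [alt_eq_gFmt (x :: y :: z :: rest) (by simp)]
    rw [loopA_eq_gFmt (x :: y :: z :: rest) "" 0 (by simp) (by simp)]
    simp
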